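-- pv_equiv track=rewrite | github.com/PavelNikolaeW/omnimap-back | api/calc_custom_grid.py | calc_size_grid
-- ===== SOURCE A (Python) =====
-- def calc_size_grid(classes):
--     col, row = 1, 1
--     for cls in classes:
--         if cls.startswith('grid-template-columns'):
--             col = len(cls.rstrip('_').split('__'))
--         if cls.startswith('grid-template-rows'):
--             row = len(cls.rstrip('_').split('__'))
--     return col, row
-- ===== SOURCE B (Python) =====
-- def calc_size_grid(classes):
--     def grid_count(prefix):
--         for cls in reversed(classes):
--             if cls.startswith(prefix):
--                 return len(cls.rstrip('_').split('__'))
--         return 1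
--     return grid_count('grid-template-columns'), grid_count('grid-template-rows')
-- ===== Notes on version B (the rewrite author's own statement) =====
-- stated objective: alternative
-- what changed: Replaces the single interleaved stateful pass with two independent backward scans (one per prefix) that early-return at the first match from the end, exploiting last-match-wins.
import Mathlib
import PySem

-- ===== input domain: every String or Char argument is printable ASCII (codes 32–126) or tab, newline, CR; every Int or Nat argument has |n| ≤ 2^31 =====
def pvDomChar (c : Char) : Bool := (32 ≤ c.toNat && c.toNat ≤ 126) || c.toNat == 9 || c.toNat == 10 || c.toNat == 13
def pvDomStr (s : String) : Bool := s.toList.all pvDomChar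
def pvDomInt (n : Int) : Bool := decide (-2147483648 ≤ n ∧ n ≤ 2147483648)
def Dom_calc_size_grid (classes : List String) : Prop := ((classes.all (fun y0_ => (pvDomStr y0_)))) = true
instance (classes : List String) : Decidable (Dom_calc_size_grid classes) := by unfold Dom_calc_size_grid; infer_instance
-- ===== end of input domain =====

-- ===== PORT A =====
-- segment count len(cls.rstrip('_').split('__')); rstrip('_') ported by hand as
-- dropping trailing '_' characters (exact: Python strips exactly the chars in the set from the right)
def pvSegs (cls : String) : Int :=
  ((PySem.Chars.splitOn ((cls.toList.reverse.dropWhile (fun c => c == '_')).reverse) "__".toList).length : Int)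

def calc_size_grid (classes : List String) : Int × Int :=
  classes.foldl (fun (cr : Int × Int) cls =>
    let col := if PySem.Str.startswith cls "grid-template-columns" then pvSegs cls else cr.1
    let row := if PySem.Str.startswith cls "grid-template-rows" then pvSegs cls else cr.2
    (col, row)) (1, 1)

-- ===== PORT B =====
-- B's grid_count: scan the reversed list, return at the first class with the prefix
def pvGridCount (pfx : String) : List String → Int
  | [] => 1
  | cls :: rest => if PySem.Str.startswith cls pfx then pvSegs cls else pvGridCount pfx rest

def calc_size_grid_alt (classes : List String) : Int × Int :=
  (pvGridCount "grid-template-columns" classes.reverse,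
   pvGridCount "grid-template-rows" classes.reverse)

-- ===== PRECONDITION & SPEC =====
def Spec_calc_size_grid (classes : List String) (out : Int × Int) : Prop := out = calc_size_grid_alt classes
instance (classes : List String) (out : Int × Int) : Decidable (Spec_calc_size_grid classes out) := by unfold Spec_calc_size_grid; infer_instance

-- ===== CLAIM (what is proved, stated in full; the proofs are below) =====
def Claim_equal_calc_size_grid : Prop := ∀ (classes : List String), Dom_calc_size_grid classes → Spec_calc_size_grid classes (calc_size_grid classes)

-- ===== LEMMAS AND PROOFS =====
theorem calc_eq_alt (classes : List String) : calc_size_grid classes = calc_size_grid_alt classes := by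
  induction classes using List.reverseRecOn with
  | nil => rfl
  | append_singleton xs x ih =>
      simp only [calc_size_grid, calc_size_grid_alt, List.foldl_append, List.foldl_cons,
        List.foldl_nil, List.reverse_append, List.reverse_cons, List.reverse_nil,
        List.nil_append, List.cons_append, pvGridCount] at *
      rw [ih]

-- ===== VERDICT (by name: the statement is the Claim_ definition above) =====
theorem calc_size_grid_spec : Claim_equal_calc_size_grid := by
  intro classes _
  unfold Spec_calc_size_grid
  exact calc_eq_alt classes
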